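-- pv_equiv track=rewrite | github.com/eddiethedean/mock-spark | mock_spark/compat/datetime.py | _java_to_polars_date_format
-- ===== SOURCE A (Python) =====
-- def _java_to_polars_date_format(fmt: str) -> str:
--     mapping = {
--         "yyyy": "%Y",
--         "yy": "%y",
--         "MM": "%m",
--         "dd": "%d",
--     }
--     result = fmt
--     for java_token, polars_token in sorted(mapping.items(), key=lambda item: len(item[0]), reverse=True):
--         result = result.replace(java_token, polars_token)
--     return result
-- ===== SOURCE B (Python) =====
-- def _java_to_polars_date_format(fmt: str) -> str:
--     # Single left-to-right greedy scan (longest token first) instead of four replace passes.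
--     tokens = (("yyyy", "%Y"), ("yy", "%y"), ("MM", "%m"), ("dd", "%d"))
--     out = []
--     i = 0
--     n = len(fmt)
--     while i < n:
--         for java_token, polars_token in tokens:
--             if fmt.startswith(java_token, i):
--                 out.append(polars_token)
--                 i += len(java_token)
--                 break
--         else:
--             out.append(fmt[i])
--             i += 1
--     return "".join(out)
-- ===== Notes on version B (the rewrite author's own statement) =====
-- stated objective: alternative
-- what changed: Replaces the four sequential full-string str.replace passes by a single left-to-right greedy longest-match scan that emits each Polars token (or the untouched character) once.
import Mathlib
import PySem

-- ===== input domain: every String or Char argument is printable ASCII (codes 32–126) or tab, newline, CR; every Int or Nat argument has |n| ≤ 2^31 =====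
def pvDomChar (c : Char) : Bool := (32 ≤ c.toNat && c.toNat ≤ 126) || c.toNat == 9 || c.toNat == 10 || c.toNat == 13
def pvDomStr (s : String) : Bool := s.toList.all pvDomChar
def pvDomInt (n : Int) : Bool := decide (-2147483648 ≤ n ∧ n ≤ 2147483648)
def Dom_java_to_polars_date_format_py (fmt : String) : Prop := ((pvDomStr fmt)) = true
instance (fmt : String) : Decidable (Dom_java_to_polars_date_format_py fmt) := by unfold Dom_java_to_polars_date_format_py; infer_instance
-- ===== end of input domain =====

-- B replaces A's four sequential str.replace passes by one greedy longest-match scan over the string (alternative algorithm, same return value).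


-- ===== PORT A =====
-- literal port of A: build the mapping dict, sort its items by key length descending, fold str.replace over them
def java_to_polars_date_format_py (fmt : String) : String :=
  let mapping : PySem.Dict String String :=
    PySem.Dict.ofList [("yyyy", "%Y"), ("yy", "%y"), ("MM", "%m"), ("dd", "%d")]
  (PySem.List.sorted mapping.items (fun item => PySem.Str.len item.1) true).foldl
    (fun result p => PySem.Str.replace result p.1 p.2) fmt


-- ===== PORT B =====
-- literal port of B's while-loop: at each position try the tokens in order (startswith), emit the
-- replacement and advance by the token length on a match, else emit the character and advance by one
def altGoL : List Char → List Char
  | [] => []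
  | c :: t =>
    if ['y','y','y','y'].isPrefixOf (c :: t) then '%' :: 'Y' :: altGoL (t.drop 3)
    else if ['y','y'].isPrefixOf (c :: t) then '%' :: 'y' :: altGoL (t.drop 1)
    else if ['M','M'].isPrefixOf (c :: t) then '%' :: 'm' :: altGoL (t.drop 1)
    else if ['d','d'].isPrefixOf (c :: t) then '%' :: 'd' :: altGoL (t.drop 1)
    else c :: altGoL t
  termination_by l => l.length
  decreasing_by all_goals (simp [List.length_drop]; try omega)


def java_to_polars_date_format_py_alt (fmt : String) : String :=
  String.ofList (altGoL fmt.toList)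


-- ===== PRECONDITION & SPEC =====
def Spec_java_to_polars_date_format_py (fmt : String) (out : String) : Prop := out = java_to_polars_date_format_py_alt fmt
instance (fmt : String) (out : String) : Decidable (Spec_java_to_polars_date_format_py fmt out) := by unfold Spec_java_to_polars_date_format_py; infer_instance

-- ===== CLAIM (what is proved, stated in full; the proofs are below) =====
def Claim_equal_java_to_polars_date_format_py : Prop := ∀ (fmt : String), Dom_java_to_polars_date_format_py fmt → Spec_java_to_polars_date_format_py fmt (java_to_polars_date_format_py fmt)

-- ===== LEMMAS AND PROOFS =====
-- fuel-free characterisation of PySem.Chars.replace (for a nonempty pattern)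

def repAux (old new : List Char) : List Char → List Char
  | [] => []
  | c :: t =>
    if old.isPrefixOf (c :: t) then new ++ repAux old new (t.drop (old.length - 1))
    else c :: repAux old new t
  termination_by l => l.length
  decreasing_by all_goals (simp [List.length_drop]; try omega)

theorem repAux_nil (old new : List Char) : repAux old new [] = [] := by
  rw [repAux.eq_def]

theorem notPrefix2 (a c : Char) (l : List Char) (h : c ≠ a) :
    [a, a].isPrefixOf (c :: l) = false := by
  simp [List.isPrefixOf]
  intro h'
  exact absurd h'.symm h

theorem notPrefix4_1 (a c : Char) (l : List Char) (h : c ≠ a) :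
    [a, a, a, a].isPrefixOf (c :: l) = false := by
  simp [List.isPrefixOf]
  intro h'
  exact absurd h'.symm h

theorem notPrefix4_2 (a c : Char) (l : List Char) (h : c ≠ a) :
    [a, a, a, a].isPrefixOf (a :: c :: l) = false := by
  simp [List.isPrefixOf]
  intro h'
  exact absurd h'.symm h

theorem notPrefix4_3 (a c : Char) (l : List Char) (h : c ≠ a) :
    [a, a, a, a].isPrefixOf (a :: a :: c :: l) = false := by
  simp [List.isPrefixOf]
  intro h'
  exact absurd h'.symm h

theorem repAux_skip (old new : List Char) (c : Char) (t : List Char)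
    (h : old.isPrefixOf (c :: t) = false) :
    repAux old new (c :: t) = c :: repAux old new t := by
  rw [repAux, if_neg (by simp [h])]

theorem repAux_pos2 (a : Char) (new t : List Char) :
    repAux [a, a] new (a :: a :: t) = new ++ repAux [a, a] new t := by
  rw [repAux, if_pos (by simp [List.isPrefixOf])]
  simp

theorem repAux_pos4 (a : Char) (new t : List Char) :
    repAux [a, a, a, a] new (a :: a :: a :: a :: t) = new ++ repAux [a, a, a, a] new t := by
  rw [repAux, if_pos (by simp [List.isPrefixOf])]
  simp

-- skip for a 2-char pattern at a non-matching head char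
theorem skipNe (a : Char) (new : List Char) (c : Char) (l : List Char) (h : c ≠ a) :
    repAux [a, a] new (c :: l) = c :: repAux [a, a] new l :=
  repAux_skip _ _ _ _ (notPrefix2 a c l h)

-- skip for a 2-char pattern at a matching head whose successor does not match
theorem skipHead (a : Char) (new : List Char) (l : List Char) (h : l.head? ≠ some a) :
    repAux [a, a] new (a :: l) = a :: repAux [a, a] new l := by
  apply repAux_skip
  cases l with
  | nil => simp [List.isPrefixOf]
  | cons e l' =>
    have he : e ≠ a := by simpa using h
    simp [List.isPrefixOf]
    intro h'
    exact absurd h'.symm he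

theorem repAux_head (old : List Char) (nr : List Char) (l : List Char) (a : Char)
    (ha : a ≠ '%') (hl : l.head? ≠ some a) :
    (repAux old ('%' :: nr) l).head? ≠ some a := by
  cases l with
  | nil => simp [repAux_nil]
  | cons c t =>
    rw [repAux]
    by_cases hp : old.isPrefixOf (c :: t)
    · simp [hp, Ne.symm ha]
    · simp only [hp, if_false, Bool.false_eq_true]
      simpa using hl

theorem go_eq (old new : List Char) (hold : old ≠ []) :
    ∀ fuel l acc, l.length ≤ fuel →
      PySem.Chars.replace.go old new fuel l acc = acc.reverse ++ repAux old new l := by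
  intro fuel
  induction fuel with
  | zero =>
    intro l acc h
    have hl : l = [] := by cases l <;> simp_all
    subst hl
    simp [PySem.Chars.replace.go, repAux_nil]
  | succ n ih =>
    intro l acc h
    cases l with
    | nil => simp [PySem.Chars.replace.go, repAux_nil]
    | cons c t =>
      rw [PySem.Chars.replace.go]
      by_cases hp : old.isPrefixOf (c :: t)
      · have hlen : old.length ≥ 1 := by cases old <;> simp_all
        have hdrop : List.drop old.length (c :: t) = t.drop (old.length - 1) := by
          cases old with
          | nil => exact absurd rfl hold
          | cons o os => simp
        simp only [hp, if_true]
        rw [ih _ _ (by rw [hdrop]; simp only [List.length_drop]; simp at h; omega)]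
        rw [repAux, if_pos hp, hdrop]
        simp
      · simp only [hp, if_false, Bool.false_eq_true]
        rw [ih t (c :: acc) (by simp at h; omega)]
        rw [repAux, if_neg (by simp [hp])]
        simp

theorem replace_eq_repAux (s old new : List Char) (hold : old ≠ []) :
    PySem.Chars.replace s old new = repAux old new s := by
  rw [PySem.Chars.replace, if_neg (by simp [List.isEmpty_iff, hold])]
  simpa using go_eq old new hold s.length s [] le_rfl

theorem notPrefix2_2 (a c : Char) (l : List Char) (h : c ≠ a) :
    [a, a].isPrefixOf (a :: c :: l) = false := by
  simp [List.isPrefixOf]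
  intro h'
  exact absurd h'.symm h

theorem altGoL_cons (c : Char) (t : List Char)
    (h4 : ['y','y','y','y'].isPrefixOf (c :: t) = false)
    (h2 : ['y','y'].isPrefixOf (c :: t) = false)
    (hM : ['M','M'].isPrefixOf (c :: t) = false)
    (hD : ['d','d'].isPrefixOf (c :: t) = false) :
    altGoL (c :: t) = c :: altGoL t := by
  rw [altGoL, if_neg (by simp [h4]), if_neg (by simp [h2]), if_neg (by simp [hM]),
    if_neg (by simp [hD])]

def rY4 (l : List Char) : List Char := repAux ['y','y','y','y'] ['%','Y'] l
def rY2 (l : List Char) : List Char := repAux ['y','y'] ['%','y'] l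
def rM2 (l : List Char) : List Char := repAux ['M','M'] ['%','m'] l
def rD2 (l : List Char) : List Char := repAux ['d','d'] ['%','d'] l
def chainA (l : List Char) : List Char := rD2 (rM2 (rY2 (rY4 l)))

theorem chainA_cons (c : Char) (t : List Char)
    (h4 : ¬ (['y','y','y','y'].isPrefixOf (c :: t) = true))
    (h2 : ¬ (['y','y'].isPrefixOf (c :: t) = true))
    (hM : ¬ (['M','M'].isPrefixOf (c :: t) = true))
    (hD : ¬ (['d','d'].isPrefixOf (c :: t) = true)) :
    chainA (c :: t) = c :: chainA t := by
  unfold chainA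
  rw [show rY4 (c :: t) = c :: rY4 t from
    repAux_skip _ _ _ _ (Bool.eq_false_iff.mpr h4)]
  have hy : c = 'y' → (rY4 t).head? ≠ some 'y' := by
    intro hc
    have ht : t.head? ≠ some 'y' := by
      cases t with
      | nil => simp
      | cons e t' =>
        intro he; simp at he
        exact h2 (by simp [List.isPrefixOf, hc, he])
    exact repAux_head _ _ _ _ (by decide) ht
  have sy : rY2 (c :: rY4 t) = c :: rY2 (rY4 t) := by
    by_cases hc : c = 'y'
    · subst hc; exact skipHead _ _ _ (hy rfl)
    · exact skipNe _ _ _ _ hc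
  rw [sy]
  have hm : c = 'M' → (rY2 (rY4 t)).head? ≠ some 'M' := by
    intro hc
    have ht : t.head? ≠ some 'M' := by
      cases t with
      | nil => simp
      | cons e t' =>
        intro he; simp at he
        exact hM (by simp [List.isPrefixOf, hc, he])
    exact repAux_head _ _ _ _ (by decide) (repAux_head _ _ _ _ (by decide) ht)
  have sm : rM2 (c :: rY2 (rY4 t)) = c :: rM2 (rY2 (rY4 t)) := by
    by_cases hc : c = 'M'
    · subst hc; exact skipHead _ _ _ (hm rfl)
    · exact skipNe _ _ _ _ hc
  rw [sm]
  have hd : c = 'd' → (rM2 (rY2 (rY4 t))).head? ≠ some 'd' := by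
    intro hc
    have ht : t.head? ≠ some 'd' := by
      cases t with
      | nil => simp
      | cons e t' =>
        intro he; simp at he
        exact hD (by simp [List.isPrefixOf, hc, he])
    exact repAux_head _ _ _ _ (by decide)
      (repAux_head _ _ _ _ (by decide) (repAux_head _ _ _ _ (by decide) ht))
  have sd : rD2 (c :: rM2 (rY2 (rY4 t))) = c :: rD2 (rM2 (rY2 (rY4 t))) := by
    by_cases hc : c = 'd'
    · subst hc; exact skipHead _ _ _ (hd rfl)
    · exact skipNe _ _ _ _ hc
  rw [sd]

theorem chainA_eq_altGoL (l : List Char) : chainA l = altGoL l := by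
  generalize hn : l.length = n
  induction n using Nat.strong_induction_on generalizing l with
  | _ n ih =>
  cases l with
  | nil => simp [chainA, rY4, rY2, rM2, rD2, repAux_nil, altGoL]
  | cons c t =>
    subst hn
    by_cases h4 : ['y','y','y','y'].isPrefixOf (c :: t) = true
    · obtain ⟨u, hu⟩ := List.isPrefixOf_iff_prefix.mp h4
      have hu2 : c :: t = 'y' :: 'y' :: 'y' :: 'y' :: u := by simpa using hu.symm
      obtain ⟨hc, ht⟩ := List.cons_eq_cons.mp hu2
      subst hc; subst ht
      rw [altGoL, if_pos h4]
      unfold chainA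
      rw [show rY4 ('y'::'y'::'y'::'y'::u) = ['%','Y'] ++ rY4 u from repAux_pos4 _ _ _]
      simp only [List.cons_append, List.nil_append]
      rw [show rY2 ('%'::'Y'::rY4 u) = '%' :: rY2 ('Y'::rY4 u) from skipNe _ _ _ _ (by decide)]
      rw [show rY2 ('Y'::rY4 u) = 'Y' :: rY2 (rY4 u) from skipNe _ _ _ _ (by decide)]
      rw [show rM2 ('%'::'Y'::rY2 (rY4 u)) = '%' :: rM2 ('Y'::rY2 (rY4 u)) from skipNe _ _ _ _ (by decide)]
      rw [show rM2 ('Y'::rY2 (rY4 u)) = 'Y' :: rM2 (rY2 (rY4 u)) from skipNe _ _ _ _ (by decide)]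
      rw [show rD2 ('%'::'Y'::rM2 (rY2 (rY4 u))) = '%' :: rD2 ('Y'::rM2 (rY2 (rY4 u))) from skipNe _ _ _ _ (by decide)]
      rw [show rD2 ('Y'::rM2 (rY2 (rY4 u))) = 'Y' :: rD2 (rM2 (rY2 (rY4 u))) from skipNe _ _ _ _ (by decide)]
      have hrec : chainA u = altGoL u := ih u.length (by simp; omega) u rfl
      unfold chainA at hrec
      simp [hrec]
    · by_cases h2 : ['y','y'].isPrefixOf (c :: t) = true
      · obtain ⟨u, hu⟩ := List.isPrefixOf_iff_prefix.mp h2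
        have hu2 : c :: t = 'y' :: 'y' :: u := by simpa using hu.symm
        obtain ⟨hc, ht⟩ := List.cons_eq_cons.mp hu2
        subst hc; subst ht
        rw [altGoL, if_neg h4, if_pos h2]
        simp only [List.drop_succ_cons, List.drop_zero]
        cases u with
        | nil =>
          unfold chainA
          rw [show rY4 ['y','y'] = 'y' :: rY4 ['y'] from repAux_skip _ _ _ _ (by decide)]
          rw [show rY4 ['y'] = 'y' :: rY4 [] from repAux_skip _ _ _ _ (by decide)]
          rw [show rY4 [] = ([] : List Char) from repAux_nil _ _]
          rw [show rY2 ['y','y'] = ['%','y'] ++ rY2 [] from repAux_pos2 _ _ _]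
          rw [show rY2 [] = ([] : List Char) from repAux_nil _ _]
          simp only [List.append_nil]
          rw [show rM2 ['%','y'] = '%' :: rM2 ['y'] from skipNe _ _ _ _ (by decide)]
          rw [show rM2 ['y'] = 'y' :: rM2 [] from skipNe _ _ _ _ (by decide)]
          rw [show rM2 [] = ([] : List Char) from repAux_nil _ _]
          rw [show rD2 ['%','y'] = '%' :: rD2 ['y'] from skipNe _ _ _ _ (by decide)]
          rw [show rD2 ['y'] = 'y' :: rD2 [] from skipNe _ _ _ _ (by decide)]
          rw [show rD2 [] = ([] : List Char) from repAux_nil _ _]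
          rw [altGoL]
        | cons e t3 =>
          by_cases he : e = 'y'
          · subst he
            have ht3 : t3.head? ≠ some 'y' := by
              cases t3 with
              | nil => simp
              | cons f t4 =>
                intro hf; simp at hf
                exact h4 (by simp [List.isPrefixOf, hf])
            unfold chainA
            rw [show rY4 ('y'::'y'::'y'::t3) = 'y' :: rY4 ('y'::'y'::t3) from
              repAux_skip _ _ _ _ (Bool.eq_false_iff.mpr h4)]
            rw [show rY4 ('y'::'y'::t3) = 'y' :: rY4 ('y'::t3) from
              repAux_skip _ _ _ _ (by
                cases t3 with
                | nil => decide
                | cons f t4 =>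
                  have hf : f ≠ 'y' := by intro hf; exact ht3 (by simp [hf])
                  exact notPrefix4_3 _ _ _ hf)]
            rw [show rY4 ('y'::t3) = 'y' :: rY4 t3 from
              repAux_skip _ _ _ _ (by
                cases t3 with
                | nil => decide
                | cons f t4 =>
                  have hf : f ≠ 'y' := by intro hf; exact ht3 (by simp [hf])
                  exact notPrefix4_2 _ _ _ hf)]
            have hhd : (rY4 t3).head? ≠ some 'y' := repAux_head _ _ _ _ (by decide) ht3
            rw [show rY2 ('y'::'y'::'y'::rY4 t3) = ['%','y'] ++ rY2 ('y'::rY4 t3) from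
              repAux_pos2 _ _ _]
            simp only [List.cons_append, List.nil_append]
            rw [show rY2 ('y'::rY4 t3) = 'y' :: rY2 (rY4 t3) from skipHead _ _ _ hhd]
            rw [show rM2 ('%'::'y'::'y'::rY2 (rY4 t3)) = '%' :: rM2 ('y'::'y'::rY2 (rY4 t3)) from skipNe _ _ _ _ (by decide)]
            rw [show rM2 ('y'::'y'::rY2 (rY4 t3)) = 'y' :: rM2 ('y'::rY2 (rY4 t3)) from skipNe _ _ _ _ (by decide)]
            rw [show rM2 ('y'::rY2 (rY4 t3)) = 'y' :: rM2 (rY2 (rY4 t3)) from skipNe _ _ _ _ (by decide)]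
            rw [show rD2 ('%'::'y'::'y'::rM2 (rY2 (rY4 t3))) = '%' :: rD2 ('y'::'y'::rM2 (rY2 (rY4 t3))) from skipNe _ _ _ _ (by decide)]
            rw [show rD2 ('y'::'y'::rM2 (rY2 (rY4 t3))) = 'y' :: rD2 ('y'::rM2 (rY2 (rY4 t3))) from skipNe _ _ _ _ (by decide)]
            rw [show rD2 ('y'::rM2 (rY2 (rY4 t3))) = 'y' :: rD2 (rM2 (rY2 (rY4 t3))) from skipNe _ _ _ _ (by decide)]
            have hr : altGoL ('y' :: t3) = 'y' :: altGoL t3 := by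
              cases t3 with
              | nil => exact altGoL_cons _ _ (by decide) (by decide) (by decide) (by decide)
              | cons f t4 =>
                have hf : f ≠ 'y' := by intro hf; exact ht3 (by simp [hf])
                exact altGoL_cons _ _ (notPrefix4_2 _ _ _ hf) (notPrefix2_2 _ _ _ hf)
                  (notPrefix2 _ _ _ (by decide)) (notPrefix2 _ _ _ (by decide))
            rw [hr]
            have hrec : chainA t3 = altGoL t3 := ih t3.length (by simp; omega) t3 rfl
            unfold chainA at hrec
            simp [hrec]
          · -- exactly two leading y's
            unfold chainA
            rw [show rY4 ('y'::'y'::e::t3) = 'y' :: rY4 ('y'::e::t3) from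
              repAux_skip _ _ _ _ (notPrefix4_3 _ _ _ he)]
            rw [show rY4 ('y'::e::t3) = 'y' :: rY4 (e::t3) from
              repAux_skip _ _ _ _ (notPrefix4_2 _ _ _ he)]
            have hhd : (rY4 (e :: t3)).head? ≠ some 'y' :=
              repAux_head _ _ _ _ (by decide) (by simpa using he)
            rw [show rY2 ('y'::'y'::rY4 (e::t3)) = ['%','y'] ++ rY2 (rY4 (e::t3)) from
              repAux_pos2 _ _ _]
            simp only [List.cons_append, List.nil_append]
            rw [show rM2 ('%'::'y'::rY2 (rY4 (e::t3))) = '%' :: rM2 ('y'::rY2 (rY4 (e::t3))) from skipNe _ _ _ _ (by decide)]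
            rw [show rM2 ('y'::rY2 (rY4 (e::t3))) = 'y' :: rM2 (rY2 (rY4 (e::t3))) from skipNe _ _ _ _ (by decide)]
            rw [show rD2 ('%'::'y'::rM2 (rY2 (rY4 (e::t3)))) = '%' :: rD2 ('y'::rM2 (rY2 (rY4 (e::t3)))) from skipNe _ _ _ _ (by decide)]
            rw [show rD2 ('y'::rM2 (rY2 (rY4 (e::t3)))) = 'y' :: rD2 (rM2 (rY2 (rY4 (e::t3)))) from skipNe _ _ _ _ (by decide)]
            have hrec : chainA (e :: t3) = altGoL (e :: t3) := ih (e :: t3).length (by simp) _ rfl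
            unfold chainA at hrec
            simp [hrec]
      · by_cases hM : ['M','M'].isPrefixOf (c :: t) = true
        · obtain ⟨u, hu⟩ := List.isPrefixOf_iff_prefix.mp hM
          have hu2 : c :: t = 'M' :: 'M' :: u := by simpa using hu.symm
          obtain ⟨hc, ht⟩ := List.cons_eq_cons.mp hu2
          subst hc; subst ht
          rw [altGoL, if_neg h4, if_neg h2, if_pos hM]
          simp only [List.drop_succ_cons, List.drop_zero]
          unfold chainA
          rw [show rY4 ('M'::'M'::u) = 'M' :: rY4 ('M'::u) from
            repAux_skip _ _ _ _ (notPrefix4_1 _ _ _ (by decide))]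
          rw [show rY4 ('M'::u) = 'M' :: rY4 u from
            repAux_skip _ _ _ _ (notPrefix4_1 _ _ _ (by decide))]
          rw [show rY2 ('M'::'M'::rY4 u) = 'M' :: rY2 ('M'::rY4 u) from skipNe _ _ _ _ (by decide)]
          rw [show rY2 ('M'::rY4 u) = 'M' :: rY2 (rY4 u) from skipNe _ _ _ _ (by decide)]
          rw [show rM2 ('M'::'M'::rY2 (rY4 u)) = ['%','m'] ++ rM2 (rY2 (rY4 u)) from
            repAux_pos2 _ _ _]
          simp only [List.cons_append, List.nil_append]
          rw [show rD2 ('%'::'m'::rM2 (rY2 (rY4 u))) = '%' :: rD2 ('m'::rM2 (rY2 (rY4 u))) from skipNe _ _ _ _ (by decide)]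
          rw [show rD2 ('m'::rM2 (rY2 (rY4 u))) = 'm' :: rD2 (rM2 (rY2 (rY4 u))) from skipNe _ _ _ _ (by decide)]
          have hrec : chainA u = altGoL u := ih u.length (by simp) u rfl
          unfold chainA at hrec
          simp [hrec]
        · by_cases hD : ['d','d'].isPrefixOf (c :: t) = true
          · obtain ⟨u, hu⟩ := List.isPrefixOf_iff_prefix.mp hD
            have hu2 : c :: t = 'd' :: 'd' :: u := by simpa using hu.symm
            obtain ⟨hc, ht⟩ := List.cons_eq_cons.mp hu2
            subst hc; subst ht
            rw [altGoL, if_neg h4, if_neg h2, if_neg hM, if_pos hD]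
            simp only [List.drop_succ_cons, List.drop_zero]
            unfold chainA
            rw [show rY4 ('d'::'d'::u) = 'd' :: rY4 ('d'::u) from
              repAux_skip _ _ _ _ (notPrefix4_1 _ _ _ (by decide))]
            rw [show rY4 ('d'::u) = 'd' :: rY4 u from
              repAux_skip _ _ _ _ (notPrefix4_1 _ _ _ (by decide))]
            rw [show rY2 ('d'::'d'::rY4 u) = 'd' :: rY2 ('d'::rY4 u) from skipNe _ _ _ _ (by decide)]
            rw [show rY2 ('d'::rY4 u) = 'd' :: rY2 (rY4 u) from skipNe _ _ _ _ (by decide)]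
            rw [show rM2 ('d'::'d'::rY2 (rY4 u)) = 'd' :: rM2 ('d'::rY2 (rY4 u)) from skipNe _ _ _ _ (by decide)]
            rw [show rM2 ('d'::rY2 (rY4 u)) = 'd' :: rM2 (rY2 (rY4 u)) from skipNe _ _ _ _ (by decide)]
            rw [show rD2 ('d'::'d'::rM2 (rY2 (rY4 u))) = ['%','d'] ++ rD2 (rM2 (rY2 (rY4 u))) from
              repAux_pos2 _ _ _]
            simp only [List.cons_append, List.nil_append]
            have hrec : chainA u = altGoL u := ih u.length (by simp) u rfl
            unfold chainA at hrec
            simp [hrec]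
          · rw [altGoL, if_neg h4, if_neg h2, if_neg hM, if_neg hD]
            rw [chainA_cons c t h4 h2 hM hD]
            have hrec : chainA t = altGoL t := ih t.length (by simp) t rfl
            rw [hrec]

theorem portA_eq_chain (fmt : String) :
    java_to_polars_date_format_py fmt = String.ofList (chainA fmt.toList) := by
  show (PySem.List.sorted (PySem.Dict.ofList
      [("yyyy", "%Y"), ("yy", "%y"), ("MM", "%m"), ("dd", "%d")]).items
      (fun item => PySem.Str.len item.1) true).foldl
      (fun result p => PySem.Str.replace result p.1 p.2) fmt =
    String.ofList (chainA fmt.toList)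
  have hs : PySem.List.sorted (PySem.Dict.ofList
      [("yyyy", "%Y"), ("yy", "%y"), ("MM", "%m"), ("dd", "%d")]).items
      (fun item => PySem.Str.len item.1) true
      = [("yyyy", "%Y"), ("yy", "%y"), ("MM", "%m"), ("dd", "%d")] := by decide
  rw [hs]
  simp only [List.foldl]
  rw [← String.toList_inj]
  simp only [PySem.Str.toList_replace, String.toList_ofList]
  rw [replace_eq_repAux _ _ _ (by decide), replace_eq_repAux _ _ _ (by decide),
    replace_eq_repAux _ _ _ (by decide), replace_eq_repAux _ _ _ (by decide)]
  simp only [show ("yyyy" : String).toList = ['y','y','y','y'] from rfl,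
    show ("%Y" : String).toList = ['%','Y'] from rfl,
    show ("yy" : String).toList = ['y','y'] from rfl,
    show ("%y" : String).toList = ['%','y'] from rfl,
    show ("MM" : String).toList = ['M','M'] from rfl,
    show ("%m" : String).toList = ['%','m'] from rfl,
    show ("dd" : String).toList = ['d','d'] from rfl,
    show ("%d" : String).toList = ['%','d'] from rfl]
  rw [chainA, rY4, rY2, rM2, rD2]

-- ===== VERDICT (by name: the statement is the Claim_ definition above) =====
theorem java_to_polars_date_format_py_spec : Claim_equal_java_to_polars_date_format_py := by
  intro fmt _
  unfold Spec_java_to_polars_date_format_py java_to_polars_date_format_py_alt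
  rw [portA_eq_chain, chainA_eq_altGoL]
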